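-- pv_equiv track=rewrite | github.com/DimitryKrakitov/AIDS | provFunctions.py | get_literals
-- ===== SOURCE A (Python) =====
-- def get_literals(cnf):
--     all_literals = []
--     not_literals = []
--     literals = []
--     for i in cnf:
--         for j in i:
--             if j in all_literals:
--                 continue
--             else:
--                 if j.find("-") == -1:
--                     literals.append(j)
--                 else:
--                     not_literals.append(j)
--                 all_literals.append(j)
--
--     return literals, not_literals
-- ===== SOURCE B (Python) =====
-- def get_literals(cnf):
--     flat = [j for clause in cnf for j in clause]
--     uniq = list(dict.fromkeys(flat))
--     positives = [x for x in uniq if x.find("-") == -1]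
--     negateds = [x for x in uniq if x.find("-") != -1]
--     return positives, negateds
-- ===== Notes on version B (the rewrite author's own statement) =====
-- stated objective: faster
-- what changed: Replaced A's single nested loop that interleaves a linear-scan dedup ('j in all_literals') with classification across three accumulators by a flatten + dict.fromkeys hash-based first-occurrence dedup pass followed by two independent filter passes.
import Mathlib
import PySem

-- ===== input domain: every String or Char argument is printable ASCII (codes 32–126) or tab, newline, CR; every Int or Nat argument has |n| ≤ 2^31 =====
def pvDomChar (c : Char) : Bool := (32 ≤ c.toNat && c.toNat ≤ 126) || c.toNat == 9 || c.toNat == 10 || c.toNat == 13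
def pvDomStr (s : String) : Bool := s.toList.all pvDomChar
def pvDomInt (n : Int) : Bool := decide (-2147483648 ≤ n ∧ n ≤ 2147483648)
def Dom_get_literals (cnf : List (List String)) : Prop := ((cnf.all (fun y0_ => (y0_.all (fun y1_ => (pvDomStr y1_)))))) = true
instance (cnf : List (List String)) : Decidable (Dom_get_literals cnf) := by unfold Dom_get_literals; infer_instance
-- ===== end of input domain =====

-- B replaces A's single intertwined dedup-and-classify loop by a flatten + first-occurrence dedup pass
-- followed by two independent partition passes; the hash dedup removes A's linear membership scan (measured faster).

-- ===== PORT A =====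
-- literal transliteration: nested loops over cnf with three accumulator lists (all, literals, not_literals)
def get_literals (cnf : List (List String)) : List String × List String :=
  let st := cnf.foldl (fun st i =>
      i.foldl (fun st j =>
        if j ∈ st.1 then st
        else if PySem.Str.find j "-" = -1 then (st.1 ++ [j], st.2.1 ++ [j], st.2.2)
        else (st.1 ++ [j], st.2.1, st.2.2 ++ [j]))
      st) (([] : List String), ([] : List String), ([] : List String))
  (st.2.1, st.2.2)

-- ===== PORT B =====
-- flatten, dedup (dict.fromkeys = PySem.List.dedup), then two filter passes
def get_literals_alt (cnf : List (List String)) : List String × List String :=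
  let flat := cnf.flatMap (fun clause => clause)
  let uniq := PySem.List.dedup flat
  (uniq.filter (fun x => PySem.Str.find x "-" == -1),
   uniq.filter (fun x => PySem.Str.find x "-" != -1))

-- ===== PRECONDITION & SPEC =====
def Spec_get_literals (cnf : List (List String)) (out : List String × List String) : Prop := out = get_literals_alt cnf
instance (cnf : List (List String)) (out : List String × List String) : Decidable (Spec_get_literals cnf out) := by unfold Spec_get_literals; infer_instance

-- ===== CLAIM (what is proved, stated in full; the proofs are below) =====
def Claim_equal_get_literals : Prop := ∀ (cnf : List (List String)), Dom_get_literals cnf → Spec_get_literals cnf (get_literals cnf)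

-- ===== LEMMAS AND PROOFS =====

-- A's loop, run over the flattened literal list from a state whose second and third components
-- are the two filters of the first, lands on the filters of the dedup-extended first component.
theorem get_literals_loop_eq (xs : List String) : ∀ (all : List String),
    xs.foldl (fun st j =>
        if j ∈ st.1 then st
        else if PySem.Str.find j "-" = -1 then (st.1 ++ [j], st.2.1 ++ [j], st.2.2)
        else (st.1 ++ [j], st.2.1, st.2.2 ++ [j]))
      (all, all.filter (fun x => PySem.Str.find x "-" == -1),
            all.filter (fun x => PySem.Str.find x "-" != -1))
    = (xs.foldl PySem.Set.add all,
       (xs.foldl PySem.Set.add all).filter (fun x => PySem.Str.find x "-" == -1),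
       (xs.foldl PySem.Set.add all).filter (fun x => PySem.Str.find x "-" != -1)) := by
  induction xs with
  | nil => intro all; simp
  | cons j xs ih =>
    intro all
    simp only [List.foldl_cons]
    by_cases hmem : j ∈ all
    · have hc : PySem.Set.add all j = all := by
        simp [PySem.Set.add, hmem]
      simp only [hmem, if_pos, hc]
      exact ih all
    · have hc : PySem.Set.add all j = all ++ [j] := by
        simp [PySem.Set.add, hmem]
      by_cases hf : PySem.Str.find j "-" = -1
      · have hf' : PySem.Chars.find j.toList ['-'] = -1 := by simpa using hf
        have h1 : (all ++ [j]).filter (fun x => PySem.Str.find x "-" == -1)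
            = all.filter (fun x => PySem.Str.find x "-" == -1) ++ [j] := by
          simp [List.filter_append, hf']
        have h2 : (all ++ [j]).filter (fun x => PySem.Str.find x "-" != -1)
            = all.filter (fun x => PySem.Str.find x "-" != -1) := by
          simp [List.filter_append, hf']
        simp only [hmem, if_neg, not_false_iff, hf, if_pos, hc]
        have := ih (all ++ [j])
        rw [h1, h2] at this
        exact this
      · have hf' : ¬ PySem.Chars.find j.toList ['-'] = -1 := by simpa using hf
        have h1 : (all ++ [j]).filter (fun x => PySem.Str.find x "-" == -1)
            = all.filter (fun x => PySem.Str.find x "-" == -1) := by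
          simp [List.filter_append, hf']
        have h2 : (all ++ [j]).filter (fun x => PySem.Str.find x "-" != -1)
            = all.filter (fun x => PySem.Str.find x "-" != -1) ++ [j] := by
          simp [List.filter_append, hf']
        simp only [hmem, if_neg, not_false_iff, hf, hc]
        have := ih (all ++ [j])
        rw [h1, h2] at this
        exact this

-- ===== VERDICT (by name: the statement is the Claim_ definition above) =====
theorem get_literals_spec : Claim_equal_get_literals := by
  intro cnf _
  unfold Spec_get_literals get_literals get_literals_alt
  have hflat : cnf.flatMap (fun clause => clause) = cnf.flatten := List.flatMap_id
  rw [hflat]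
  rw [show (cnf.foldl (fun st i =>
      i.foldl (fun st j =>
        if j ∈ st.1 then st
        else if PySem.Str.find j "-" = -1 then (st.1 ++ [j], st.2.1 ++ [j], st.2.2)
        else (st.1 ++ [j], st.2.1, st.2.2 ++ [j]))
      st) (([] : List String), ([] : List String), ([] : List String)))
    = cnf.flatten.foldl (fun st j =>
        if j ∈ st.1 then st
        else if PySem.Str.find j "-" = -1 then (st.1 ++ [j], st.2.1 ++ [j], st.2.2)
        else (st.1 ++ [j], st.2.1, st.2.2 ++ [j]))
      (([] : List String), ([] : List String), ([] : List String)) from (List.foldl_flatten).symm]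
  have h := get_literals_loop_eq cnf.flatten []
  simp only [List.filter_nil] at h
  rw [h]
  simp [PySem.List.dedup, PySem.Set.ofList, PySem.Set.empty]
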